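-- pv_equiv track=rewrite | github.com/PNeekeetah/Leetcode_Problems | Number_of_Good_Ways_to_Split_a_String.py | numSplits2
-- ===== SOURCE A (Python) =====
-- def numSplits2(s: str) -> int:
--     head_tail = set()
--     tail_head = set()
--     t_h_sum = []
--
--     for i in range(len(s)-1,-1,-1):
--         tail_head.add(s[i])
--         t_h_sum.append(len(tail_head))
--
--     eq = 0
--     for i in range(len(s)-1):
--         head_tail.add(s[i])
--         eq += (len(head_tail) == t_h_sum[len(t_h_sum)-i-2])
--
--     return eq
-- ===== SOURCE B (Python) =====
-- def numSplits2(s: str) -> int: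
--     # One incremental pass: move characters from a right multiset to a left
--     # multiset, keeping both distinct-key counts in sync.
--     right = {}
--     for c in s:
--         right[c] = right.get(c, 0) + 1
--     left = {}
--     eq = 0
--     for c in s[:-1]:
--         left[c] = left.get(c, 0) + 1
--         right[c] -= 1
--         if right[c] == 0:
--             del right[c]
--         eq += (len(left) == len(right))
--     return eq
-- ===== Notes on version B (the rewrite author's own statement) =====
-- stated objective: idiomatic
-- what changed: Replaces A's precomputed backward suffix-distinct-count array plus forward indexing into it with a single incremental pass that transfers each character from a right count-dict to a left count-dict (deleting keys that hit zero) and compares the two dicts' sizes on the fly.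
import Mathlib
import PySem

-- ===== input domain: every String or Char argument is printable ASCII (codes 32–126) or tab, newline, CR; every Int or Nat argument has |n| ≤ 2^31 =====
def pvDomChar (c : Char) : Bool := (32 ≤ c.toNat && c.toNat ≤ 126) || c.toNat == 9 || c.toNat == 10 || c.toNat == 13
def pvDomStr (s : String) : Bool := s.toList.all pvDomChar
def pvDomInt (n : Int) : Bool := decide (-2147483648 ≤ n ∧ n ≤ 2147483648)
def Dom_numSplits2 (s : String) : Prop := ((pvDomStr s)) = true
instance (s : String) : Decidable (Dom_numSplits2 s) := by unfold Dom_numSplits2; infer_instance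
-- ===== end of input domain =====

-- B replaces A's precomputed suffix-distinct-count array with one incremental pass moving
-- characters from a right count-dict to a left count-dict (objective: idiomatic; same O(n) cost).

-- ===== PORT A =====
def numSplits2 (s : String) : Int :=
  let l := s.toList
  let n : Int := (PySem.Str.len s : Int)
  let p1 := (PySem.List.pyRange (n - 1) (-1) (-1)).foldl
      (fun (st : PySem.Set Char × List Nat) i =>
        let th := st.1.add (PySem.List.pyGetD l i ' ')   -- s[i]; index always in range
        (th, st.2 ++ [th.length]))
      (PySem.Set.empty, [])
  let thSum := p1.2
  let p2 := (PySem.List.pyRange 0 (n - 1) 1).foldl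
      (fun (st : PySem.Set Char × Int) i =>
        let ht := st.1.add (PySem.List.pyGetD l i ' ')   -- s[i]; index always in range
        (ht, st.2 +
          (if ht.length = PySem.List.pyGetD thSum ((thSum.length : Int) - i - 2) 0 then 1 else 0)))
      (PySem.Set.empty, 0)
  p2.2

-- ===== PORT B =====
def numSplits2_alt (s : String) : Int :=
  let l := s.toList
  let right := l.foldl (fun (d : PySem.Dict Char Int) c => d.insert c (d.getD c 0 + 1))
      PySem.Dict.empty
  let p := (PySem.List.slice l none (some (-1))).foldl
      (fun (st : PySem.Dict Char Int × PySem.Dict Char Int × Int) c =>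
        let left := st.1.insert c (st.1.getD c 0 + 1)
        let r1 := st.2.1.insert c (st.2.1.getD c 0 - 1)   -- right[c] -= 1; key always present
        let r2 := if r1.getD c 0 = 0 then r1.erase c else r1
        (left, r2, st.2.2 + (if left.size = r2.size then 1 else 0)))
      (PySem.Dict.empty, right, 0)
  p.2.2

-- ===== PRECONDITION & SPEC =====
def Spec_numSplits2 (s : String) (out : Int) : Prop := out = numSplits2_alt s
instance (s : String) (out : Int) : Decidable (Spec_numSplits2 s out) := by
  unfold Spec_numSplits2; infer_instance

-- ===== CLAIM (what is proved, stated in full; the proofs are below) =====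
def Claim_equal_numSplits2 : Prop := ∀ (s : String), Dom_numSplits2 s → Spec_numSplits2 s (numSplits2 s)

-- ===== LEMMAS AND PROOFS =====

-- number of distinct characters of a list
def pvD (t : List Char) : Nat := (PySem.Set.ofList t).length

-- the common value both programs compute: for each split point i+1, compare
-- the distinct counts of the two halves
def pvG (l : List Char) : Int :=
  ((List.range (l.length - 1)).map
    (fun i => if pvD (l.take (i + 1)) = pvD (l.drop (i + 1)) then (1 : Int) else 0)).sum

-- the left dict after m characters
def pvLeft (l : List Char) (m : Nat) : PySem.Dict Char Int :=
  (l.take m).foldl (fun d c => d.insert c (d.getD c 0 + 1)) PySem.Dict.empty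

-- what the right dict looks like after m characters: counts of the suffix, zero keys absent
def pvRspec (l : List Char) (m : Nat) (R : PySem.Dict Char Int) : Prop :=
  ∀ c, R.get? c = if (l.drop m).count c = 0 then none else some (((l.drop m).count c : Int))

theorem pvLenEq {α : Type} {xs ys : List α} (hx : xs.Nodup) (hy : ys.Nodup)
    (h : ∀ a, a ∈ xs ↔ a ∈ ys) : xs.length = ys.length :=
  ((List.perm_ext_iff_of_nodup hx hy).mpr h).length_eq

theorem pvSet_reverse_len (t : List Char) :
    (PySem.Set.ofList t.reverse).length = (PySem.Set.ofList t).length := by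
  apply pvLenEq (PySem.Set.nodup_ofList _) (PySem.Set.nodup_ofList _)
  intro a; simp [PySem.Set.mem_ofList]

theorem pvSet_add_eq (xs : List Char) (x : Char) :
    (PySem.Set.ofList xs).add x = PySem.Set.ofList (xs ++ [x]) := by
  rw [PySem.Set.ofList_append]; rfl

theorem pvLoopA1 (l : List Char) (m : Nat) (hm : m ≤ l.length) :
    ((List.range m).map (fun k : Nat => ((l.length : Int) - 1 - (k : Int)))).foldl
      (fun (st : PySem.Set Char × List Nat) i =>
        let th := st.1.add (PySem.List.pyGetD l i ' ')
        (th, st.2 ++ [th.length]))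
      (PySem.Set.empty, [])
    = (PySem.Set.ofList ((l.drop (l.length - m)).reverse),
       (List.range m).map (fun j => pvD (l.drop (l.length - 1 - j)))) := by
  induction m with
  | zero => simp [PySem.Set.empty]
  | succ m ih =>
    have hm' : m ≤ l.length := Nat.le_of_succ_le hm
    rw [List.range_succ, List.map_append, List.map_append, List.foldl_append, ih hm']
    simp only [List.map_cons, List.map_nil, List.foldl_cons, List.foldl_nil]
    have hidx : ((l.length : Int) - 1 - (m : Int)) = ((l.length - 1 - m : Nat) : Int) := by
      omega
    have hlt : l.length - 1 - m < l.length := by omega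
    have hget : PySem.List.pyGetD l ((l.length : Int) - 1 - (m : Int)) ' ' = l[l.length - 1 - m] := by
      rw [hidx, PySem.List.pyGetD_natCast, List.getD_eq_getElem l ' ' hlt]
    have hdrop : l.drop (l.length - (m + 1)) = l[l.length - 1 - m] :: l.drop (l.length - m) := by
      have h1 : l.length - (m + 1) = l.length - 1 - m := by omega
      have h2 : l.length - 1 - m + 1 = l.length - m := by omega
      rw [h1, List.drop_eq_getElem_cons hlt, h2]
    have hset : (PySem.Set.ofList ((l.drop (l.length - m)).reverse)).add l[l.length - 1 - m]
        = PySem.Set.ofList ((l.drop (l.length - (m + 1))).reverse) := by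
      rw [pvSet_add_eq, hdrop, List.reverse_cons]
    rw [hget, hset]
    have hlen : (PySem.Set.ofList ((l.drop (l.length - (m + 1))).reverse)).length
        = pvD (l.drop (l.length - 1 - m)) := by
      rw [show l.length - (m + 1) = l.length - 1 - m by omega, pvSet_reverse_len]; rfl
    rw [hlen]

theorem pvThSum (l : List Char) :
    (PySem.List.pyRange ((l.length : Int) - 1) (-1) (-1)).foldl
      (fun (st : PySem.Set Char × List Nat) i =>
        let th := st.1.add (PySem.List.pyGetD l i ' ')
        (th, st.2 ++ [th.length]))
      (PySem.Set.empty, [])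
    = (PySem.Set.ofList l.reverse,
       (List.range l.length).map (fun j => pvD (l.drop (l.length - 1 - j)))) := by
  rw [PySem.List.pyRange_neg_one,
    show (((l.length : Int) - 1) - (-1)).toNat = l.length by omega,
    pvLoopA1 l l.length le_rfl]
  simp

theorem pvLoopA2 (l : List Char) (thSum : List Nat)
    (hts : thSum = (List.range l.length).map (fun j => pvD (l.drop (l.length - 1 - j))))
    (m : Nat) (hm : m ≤ l.length - 1) :
    ((List.range m).map (fun k : Nat => (k : Int))).foldl
      (fun (st : PySem.Set Char × Int) i =>
        let ht := st.1.add (PySem.List.pyGetD l i ' ')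
        (ht, st.2 +
          (if ht.length = PySem.List.pyGetD thSum ((thSum.length : Int) - i - 2) 0 then 1 else 0)))
      (PySem.Set.empty, 0)
    = (PySem.Set.ofList (l.take m),
       ((List.range m).map
         (fun i => if pvD (l.take (i + 1)) = pvD (l.drop (i + 1)) then (1 : Int) else 0)).sum) := by
  have hlen : thSum.length = l.length := by rw [hts]; simp
  induction m with
  | zero => simp [PySem.Set.empty]
  | succ m ih =>
    have hm' : m ≤ l.length - 1 := Nat.le_of_succ_le hm
    have hnm : m + 1 ≤ l.length - 1 := hm
    have hn2 : m + 2 ≤ l.length := by omega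
    have hltm : m < l.length := by omega
    rw [List.range_succ, List.map_append, List.map_append, List.foldl_append, ih hm']
    simp only [List.map_cons, List.map_nil, List.foldl_cons, List.foldl_nil, List.sum_append,
      List.sum_cons, List.sum_nil]
    have hget : PySem.List.pyGetD l ((m : Nat) : Int) ' ' = l[m] := by
      rw [PySem.List.pyGetD_natCast, List.getD_eq_getElem l ' ' hltm]
    have htake : l.take (m + 1) = l.take m ++ [l[m]] := by
      rw [List.take_add_one, List.getElem?_eq_getElem hltm]; rfl
    have hht : (PySem.Set.ofList (l.take m)).add l[m] = PySem.Set.ofList (l.take (m + 1)) := by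
      rw [pvSet_add_eq, ← htake]
    have hidx : ((thSum.length : Int) - (m : Int) - 2) = ((l.length - m - 2 : Nat) : Int) := by
      rw [hlen]; omega
    have hidlt : l.length - m - 2 < l.length := by omega
    have hgd : PySem.List.pyGetD thSum ((thSum.length : Int) - (m : Int) - 2) 0
        = pvD (l.drop (m + 1)) := by
      rw [hidx, PySem.List.pyGetD_natCast, hts]
      rw [List.getD_eq_getElem _ 0 (by simpa using hidlt)]
      simp only [List.getElem_map, List.getElem_range]
      rw [show l.length - 1 - (l.length - m - 2) = m + 1 by omega]
    rw [hget, hht, hgd]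
    simp [pvD]


theorem pvFindFilter (items : List (Char × Int)) (k k' : Char) :
    (items.filter (fun p => !(p.1 == k))).find? (fun p => p.1 == k')
    = if k' = k then none else items.find? (fun p => p.1 == k') := by
  induction items with
  | nil => by_cases h : k' = k <;> simp [h]
  | cons p rest ih =>
    by_cases hk : k' = k
    · subst hk
      by_cases h1 : p.1 = k' <;> simp [h1, ih]
    · by_cases h1 : p.1 = k <;> by_cases h2 : p.1 = k' <;>
        simp_all

theorem pvGet?_erase (d : PySem.Dict Char Int) (k k' : Char) :
    (d.erase k).get? k' = if k' = k then none else d.get? k' := by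
  obtain ⟨items⟩ := d
  simp only [PySem.Dict.erase, PySem.Dict.get?, pvFindFilter]
  split <;> rfl

theorem pvNodup_keys_erase (d : PySem.Dict Char Int) (k : Char) (h : d.keys.Nodup) :
    (d.erase k).keys.Nodup := by
  obtain ⟨items⟩ := d
  simp only [PySem.Dict.erase, PySem.Dict.keys] at *
  exact ((List.filter_sublist (l := items)).map _).nodup h

theorem pvSize_eq_keys_length (d : PySem.Dict Char Int) : d.size = d.keys.length := by
  simp [PySem.Dict.size, PySem.Dict.keys]

theorem pvLeft_keys (l : List Char) (m : Nat) : (pvLeft l m).keys = PySem.Set.ofList (l.take m) := by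
  rw [pvLeft, PySem.Dict.keys_foldl_insert, PySem.Set.ofList_eq_foldl]
  rfl

theorem pvLeft_size (l : List Char) (m : Nat) : (pvLeft l m).size = pvD (l.take m) := by
  rw [pvSize_eq_keys_length, pvLeft_keys]; rfl

theorem pvR_size (l : List Char) (m : Nat) (R : PySem.Dict Char Int)
    (hs : pvRspec l m R) (hn : R.keys.Nodup) : R.size = pvD (l.drop m) := by
  rw [pvSize_eq_keys_length]
  apply pvLenEq hn (PySem.Set.nodup_ofList _)
  intro a
  rw [PySem.Set.mem_ofList]
  constructor
  · intro ha
    by_contra hmem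
    have h0 : (l.drop m).count a = 0 := List.count_eq_zero.mpr hmem
    have := (PySem.Dict.get?_eq_none_iff_not_mem_keys R a).mp (by rw [hs a, h0]; simp)
    exact this ha
  · intro ha
    have h0 : (l.drop m).count a ≠ 0 := by
      simp [List.count_eq_zero]; exact ha
    by_contra hmem
    have := (PySem.Dict.get?_eq_none_iff_not_mem_keys R a).mpr hmem
    rw [hs a] at this
    simp [h0] at this

theorem pvRight0 (l : List Char) :
    pvRspec l 0 (l.foldl (fun (d : PySem.Dict Char Int) c => d.insert c (d.getD c 0 + 1))
      PySem.Dict.empty) ∧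
    (l.foldl (fun (d : PySem.Dict Char Int) c => d.insert c (d.getD c 0 + 1))
      PySem.Dict.empty).keys.Nodup := by
  set R := l.foldl (fun (d : PySem.Dict Char Int) c => d.insert c (d.getD c 0 + 1)) PySem.Dict.empty with hR
  have hkeys : R.keys = PySem.Set.ofList l := by
    rw [hR, PySem.Dict.keys_foldl_insert, PySem.Set.ofList_eq_foldl]; rfl
  have hnd : R.keys.Nodup := by rw [hkeys]; exact PySem.Set.nodup_ofList _
  refine ⟨?_, hnd⟩
  intro c
  have hgd : R.getD c 0 = (l.count c : Int) := by
    rw [hR, PySem.Dict.getD_foldl_insert_add_one]; simp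
  have hmem : c ∈ R.keys ↔ c ∈ l := by rw [hkeys, PySem.Set.mem_ofList]
  by_cases hc : l.count c = 0
  · have : c ∉ l := List.count_eq_zero.mp hc
    rw [List.drop_zero, hc]
    exact (PySem.Dict.get?_eq_none_iff_not_mem_keys R c).mpr (by rw [hkeys, PySem.Set.mem_ofList]; exact this)
  · have hcl : c ∈ l := by rwa [← List.count_pos_iff, Nat.pos_iff_ne_zero]
    rw [List.drop_zero, if_neg hc]
    have hksome : R.get? c ≠ none := fun h =>
      ((PySem.Dict.get?_eq_none_iff_not_mem_keys R c).mp h) (hmem.mpr hcl)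
    cases hg : R.get? c with
    | none => exact absurd hg hksome
    | some v =>
      have : R.getD c 0 = v := PySem.Dict.getD_of_get?_eq_some (d := R) (k := c) (d0 := 0) (h := hg)
      rw [hgd] at this; rw [← this]

theorem pvLoopB (l : List Char) (R0 : PySem.Dict Char Int)
    (h0 : pvRspec l 0 R0) (hn0 : R0.keys.Nodup) (m : Nat) (hm : m ≤ l.length - 1) :
    ∃ R, (l.take m).foldl
      (fun (st : PySem.Dict Char Int × PySem.Dict Char Int × Int) c =>
        let left := st.1.insert c (st.1.getD c 0 + 1)
        let r1 := st.2.1.insert c (st.2.1.getD c 0 - 1)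
        let r2 := if r1.getD c 0 = 0 then r1.erase c else r1
        (left, r2, st.2.2 + (if left.size = r2.size then 1 else 0)))
      (PySem.Dict.empty, R0, 0)
      = (pvLeft l m, R,
         ((List.range m).map
           (fun i => if pvD (l.take (i + 1)) = pvD (l.drop (i + 1)) then (1 : Int) else 0)).sum)
      ∧ pvRspec l m R ∧ R.keys.Nodup := by
  induction m with
  | zero =>
    refine ⟨R0, ?_, h0, hn0⟩
    simp [pvLeft]
  | succ m ih =>
    obtain ⟨R, hfold, hspec, hnd⟩ := ih (by omega)
    have hltm : m < l.length := by omega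
    have htake : l.take (m + 1) = l.take m ++ [l[m]] := by
      rw [List.take_add_one, List.getElem?_eq_getElem hltm]; rfl
    set c := l[m] with hc
    have hdrop : l.drop m = c :: l.drop (m + 1) := List.drop_eq_getElem_cons hltm
    have hcnt : (l.drop m).count c = (l.drop (m + 1)).count c + 1 := by
      rw [hdrop, List.count_cons_self]
    have hcnt0 : (l.drop m).count c ≠ 0 := by omega
    have hgetc : R.get? c = some (((l.drop m).count c : Int)) := by
      rw [hspec c, if_neg hcnt0]
    have hgdc : R.getD c 0 = ((l.drop m).count c : Int) :=
      PySem.Dict.getD_of_get?_eq_some (d := R) (k := c) (d0 := 0) (h := hgetc)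
    have hleft : pvLeft l (m + 1) = (pvLeft l m).insert c ((pvLeft l m).getD c 0 + 1) := by
      rw [pvLeft, htake, List.foldl_append]; rfl
    rw [htake, List.foldl_append, hfold]
    simp only [List.foldl_cons, List.foldl_nil]
    set r1 := R.insert c (R.getD c 0 - 1) with hr1
    have hr1c : r1.getD c 0 = ((l.drop m).count c : Int) - 1 := by
      rw [hr1, PySem.Dict.getD_insert_self, hgdc]
    have hr1of : ∀ c', c' ≠ c → r1.get? c' = R.get? c' := fun c' h =>
      PySem.Dict.get?_insert_of_ne (d := R) (k := c) (k' := c') (v := R.getD c 0 - 1) (hne := h)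
    have hcount_ne : ∀ c', c' ≠ c → (l.drop (m + 1)).count c' = (l.drop m).count c' := by
      intro c' h
      rw [hdrop, List.count_cons]
      simp [Ne.symm h]
    set R' := if r1.getD c 0 = 0 then r1.erase c else r1 with hR'
    have hspec' : pvRspec l (m + 1) R' := by
      intro c'
      by_cases hcc : c' = c
      · subst hcc
        by_cases hz : (l.drop (m + 1)).count c = 0
        · have hb : r1.getD c 0 = 0 := by rw [hr1c, hcnt, hz]; simp
          rw [hR', if_pos hb, pvGet?_erase, if_pos rfl, if_pos hz]
        · have hb : r1.getD c 0 ≠ 0 := by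
            rw [hr1c, hcnt]
            intro h
            apply hz
            omega
          rw [hR', if_neg hb, if_neg hz, hr1, PySem.Dict.get?_insert_self, hgdc, hcnt]
          congr 1
          push_cast
          ring
      · have heq : R'.get? c' = R.get? c' := by
          rw [hR']
          split
          · rw [pvGet?_erase, if_neg hcc, hr1of c' hcc]
          · exact hr1of c' hcc
        rw [heq, hspec c', hcount_ne c' hcc]
    have hnd' : R'.keys.Nodup := by
      have h1 : r1.keys.Nodup := PySem.Dict.nodup_keys_insert (d := R) (k := c) (v := R.getD c 0 - 1) (h := hnd)
      rw [hR']; split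
      · exact pvNodup_keys_erase _ _ h1
      · exact h1
    refine ⟨R', ?_, hspec', hnd'⟩
    rw [← hleft]
    have hsz : ((pvLeft l (m+1)).size = R'.size) ↔ (pvD (l.take (m+1)) = pvD (l.drop (m+1))) := by
      rw [pvLeft_size, pvR_size l (m+1) R' hspec' hnd']
    rw [List.range_succ, List.map_append, List.sum_append]
    simp only [List.map_cons, List.map_nil, List.sum_cons, List.sum_nil, add_zero]
    congr 1
    by_cases h : pvD (l.take (m+1)) = pvD (l.drop (m+1))
    · rw [if_pos (hsz.mpr h), if_pos h]
    · rw [if_neg (fun hh => h (hsz.mp hh)), if_neg h]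

theorem pvA_eq (s : String) : numSplits2 s = pvG s.toList := by
  have key : ∀ thSum : List Nat,
      thSum = (List.range s.toList.length).map
        (fun j => pvD (s.toList.drop (s.toList.length - 1 - j))) →
      ((PySem.List.pyRange 0 ((s.toList.length : Int) - 1) 1).foldl
        (fun (st : PySem.Set Char × Int) i =>
          let ht := st.1.add (PySem.List.pyGetD s.toList i ' ')
          (ht, st.2 +
            (if ht.length = PySem.List.pyGetD thSum ((thSum.length : Int) - i - 2) 0
              then 1 else 0)))
        (PySem.Set.empty, 0)).2 = pvG s.toList := by
    intro thSum hts
    by_cases h0 : s.toList.length = 0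
    · rw [show ((s.toList.length : Int) - 1) = -1 by omega]
      simp [pvG, h0, show PySem.List.pyRange 0 (-1) 1 = [] from rfl]
    · rw [show ((s.toList.length : Int) - 1) = ((s.toList.length - 1 : Nat) : Int) by omega,
          PySem.List.pyRange_zero_natCast,
          pvLoopA2 s.toList thSum hts (s.toList.length - 1) le_rfl]
      rfl
  simp only [numSplits2, PySem.Str.len_eq]
  exact key _ (by rw [pvThSum])

theorem pvB_eq (s : String) : numSplits2_alt s = pvG s.toList := by
  obtain ⟨h0, hn0⟩ := pvRight0 s.toList
  obtain ⟨R, hfold, -, -⟩ := pvLoopB s.toList _ h0 hn0 (s.toList.length - 1) le_rfl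
  simp only [numSplits2_alt]
  rw [show PySem.List.slice s.toList none (some (-1))
        = s.toList.take (s.toList.length - 1) by simp [PySem.List.slice],
      hfold]
  rfl

-- ===== VERDICT (by name: the statement is the Claim_ definition above) =====
theorem numSplits2_spec : Claim_equal_numSplits2 := by
  intro s _
  unfold Spec_numSplits2
  rw [pvA_eq, pvB_eq]
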